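-- pv_equiv track=rewrite | github.com/yindaxiang/TensorFlow | server_31/new_test_single/improve_single.py | split_variate
-- ===== SOURCE A (Python) =====
-- def split_variate(variate_list, symbol):
--     variate_list_length = len(variate_list)
--     for _ in range(variate_list_length):
--         if variate_list[0] == '\n':
--             variate_list.pop(0)
--             continue
--         new_variate_list = variate_list[0].split(symbol)
--         for new_variate in new_variate_list:
--             if new_variate != '':
--                 variate_list.append(new_variate)
--         variate_list.pop(0)
--     return list(set(variate_list))
-- ===== SOURCE B (Python) =====
-- def split_variate(variate_list, symbol):
--     flat = []
--     for item in variate_list: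
--         if item == '\n':
--             continue
--         for part in item.split(symbol):
--             if part != '':
--                 flat.append(part)
--     variate_list[:] = flat
--     return list(set(flat))
-- ===== Notes on version B (the rewrite author's own statement) =====
-- stated objective: faster
-- what changed: Replaces A's fixed-count FIFO queue loop (pop(0) from the front, re-append split parts at the back) with one direct pass over the items building a flat list, then a slice assignment to reproduce A's in-place mutation and list(set(...)) at the end.
import Mathlib
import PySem

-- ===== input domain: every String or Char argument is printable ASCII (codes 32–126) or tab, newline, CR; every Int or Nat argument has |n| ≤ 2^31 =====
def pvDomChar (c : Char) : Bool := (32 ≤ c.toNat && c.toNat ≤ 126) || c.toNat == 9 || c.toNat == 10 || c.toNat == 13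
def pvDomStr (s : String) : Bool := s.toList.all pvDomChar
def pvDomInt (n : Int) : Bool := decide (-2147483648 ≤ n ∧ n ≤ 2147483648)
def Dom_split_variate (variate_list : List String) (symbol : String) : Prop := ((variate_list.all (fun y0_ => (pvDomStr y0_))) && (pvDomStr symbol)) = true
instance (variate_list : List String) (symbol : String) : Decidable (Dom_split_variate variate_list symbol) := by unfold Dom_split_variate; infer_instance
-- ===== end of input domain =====

-- B replaces A's fixed-count FIFO loop (pop(0) + re-append) with one direct pass building a
-- flat list (simpler). Both Pythons mutate variate_list to the same final state; the
-- equivalence proved here is about the RETURN value only.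

-- ===== PORT A =====
-- A's loop: runs len(variate_list) times; each iteration looks at the front element,
-- pops it, and (unless it is "\n") appends the non-empty parts of its split.
-- The [] case is unreachable when fuel = length (pop(0) on [] would raise in Python).
def splitVariateLoopA (symbol : String) : Nat → List String → List String
  | 0, xs => xs
  | _ + 1, [] => []
  | n + 1, h :: t =>
      if h = "\n" then splitVariateLoopA symbol n t
      else
        splitVariateLoopA symbol n
          (t ++ ((PySem.Str.split? h symbol).getD []).filter (fun p => p ≠ ""))

def split_variate (variate_list : List String) (symbol : String) : List String :=
  PySem.Set.ofList (splitVariateLoopA symbol variate_list.length variate_list)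

-- ===== PORT B =====
def split_variate_alt (variate_list : List String) (symbol : String) : List String :=
  let flat :=
    (variate_list.filter (fun item => item ≠ "\n")).flatMap
      (fun item => ((PySem.Str.split? item symbol).getD []).filter (fun p => p ≠ ""))
  PySem.Set.ofList flat

-- ===== PRECONDITION & SPEC =====
-- Python A raises ValueError ("empty separator") iff symbol = "" and some element ≠ "\n"
-- (split is only called on non-"\n" elements); Pre_ excludes exactly those inputs.
def Pre_split_variate (variate_list : List String) (symbol : String) : Prop :=
  symbol ≠ "" ∨ ∀ x ∈ variate_list, x = "\n"
instance (variate_list : List String) (symbol : String) : Decidable (Pre_split_variate variate_list symbol) := by unfold Pre_split_variate; infer_instance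

def pvWitness_split_variate : List String × String := (["a,b", "\n", "b,,c"], ",")

def Spec_split_variate (variate_list : List String) (symbol : String) (out : List String) : Prop := out = split_variate_alt variate_list symbol
instance (variate_list : List String) (symbol : String) (out : List String) : Decidable (Spec_split_variate variate_list symbol out) := by unfold Spec_split_variate; infer_instance

-- ===== CLAIM (what is proved, stated in full; the proofs are below) =====
def Claim_equal_split_variate : Prop := ∀ (variate_list : List String) (symbol : String), Dom_split_variate variate_list symbol → Pre_split_variate variate_list symbol → Spec_split_variate variate_list symbol (split_variate variate_list symbol)

-- ===== LEMMAS AND PROOFS =====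
-- The FIFO loop with fuel l.length, started on l ++ acc, consumes exactly the items of l
-- and appends their non-empty split parts behind acc.
theorem splitVariateLoopA_eq (symbol : String) :
    ∀ (l acc : List String),
      splitVariateLoopA symbol l.length (l ++ acc) =
        acc ++ (l.filter (fun item => item ≠ "\n")).flatMap
          (fun item => ((PySem.Str.split? item symbol).getD []).filter (fun p => p ≠ "")) := by
  intro l
  induction l with
  | nil => intro acc; simp [splitVariateLoopA]
  | cons h t ih =>
      intro acc
      by_cases hh : h = "\n"
      · simp [splitVariateLoopA, hh, ih acc]
      · simp only [List.length_cons, List.cons_append, splitVariateLoopA, if_neg hh,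
          List.append_assoc, ih, List.filter_cons, hh, decide_true, ne_eq,
          not_false_iff, List.flatMap_cons]
        simp [hh]

-- ===== VERDICT (by name: the statement is the Claim_ definition above) =====
theorem split_variate_spec : Claim_equal_split_variate := by
  intro vl symbol _ _
  unfold Spec_split_variate split_variate split_variate_alt
  have := splitVariateLoopA_eq symbol vl []
  simp only [List.append_nil] at this
  simp [this]
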